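-- pv_equiv track=rewrite | github.com/drewhayward/advent-of-code-2021 | day22/cuboid.py | fracture_by
-- ===== SOURCE A (Python) =====
-- from itertools import product, pairwise
--
-- def span_overlap(a, b):
--     return not (a[0] >= b[1] or a[1] <= b[0])
--
-- def get_subspans(a, b):
--     # when finding the cublets of a cube, this finds only the smallest possible
--     # ones which cover the orginal span but don't overlap
--     points = set(filter(lambda x: a[0] <= x <= a[1], a + b))
--     points = sorted(list(points))
--     return pairwise(points)
--
-- def cube_overlaps(cube1, cube2):
--     return all([
--         span_overlap(cube1[:2], cube2[:2]),
--         span_overlap(cube1[2:4], cube2[2:4]),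
--         span_overlap(cube1[4:], cube2[4:]),
--     ])
--
-- def fracture_by(cube1, cube2):
--     if not cube_overlaps(cube1, cube2): return [cube1]
--
--     # Find all subcubes that could be created by the other cube
--     xsides = get_subspans(cube1[:2], cube2[:2])
--     ysides = get_subspans(cube1[2:4], cube2[2:4])
--     zsides = get_subspans(cube1[4:], cube2[4:])
--
--     subcubes = set()
--     for xside, yside, zside in product(xsides, ysides, zsides):
--         subcube = (*xside, *yside, *zside)
--         # if this cube has no volume, skip
--         volume = max(0, xside[1] - xside[0]) * max(0, yside[1] - yside[0]) * max(0, zside[1] - zside[0])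
--         if volume == 0: continue
--
--         subcubes.add(subcube)
--
--     return subcubes
-- ===== SOURCE B (Python) =====
-- def fracture_by(cube1, cube2):
--     x0, x1, y0, y1, z0, z1 = cube1[0], cube1[1], cube1[2], cube1[3], cube1[4], cube1[5]
--     u0, u1, v0, v1, w0, w1 = cube2[0], cube2[1], cube2[2], cube2[3], cube2[4], cube2[5]
--     if x0 >= u1 or x1 <= u0 or y0 >= v1 or y1 <= v0 or z0 >= w1 or z1 <= w0:
--         return [cube1]
--     # Divide and conquer with an explicit work stack: repeatedly pick any cut
--     # plane (a coordinate of either cuboid on that axis) strictly inside the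
--     # current piece, split the piece in two there, and process the lower half
--     # first; a piece containing no cut plane is a final (maximal) subcube.
--     xcands = cube1[:2] + cube2[:2]
--     ycands = cube1[2:4] + cube2[2:4]
--     zcands = cube1[4:] + cube2[4:]
--     out = []
--     stack = [(x0, x1, y0, y1, z0, z1)]
--     while stack:
--         a, b, c, d, e, f = stack.pop()
--         for p in xcands:
--             if a < p < b:
--                 stack.append((p, b, c, d, e, f))
--                 stack.append((a, p, c, d, e, f))
--                 break
--         else:
--             for p in ycands:
--                 if c < p < d:
--                     stack.append((a, b, p, d, e, f))
--                     stack.append((a, b, c, p, e, f))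
--                     break
--             else:
--                 for p in zcands:
--                     if e < p < f:
--                         stack.append((a, b, c, d, p, f))
--                         stack.append((a, b, c, d, e, p))
--                         break
--                 else:
--                     if a < b and c < d and e < f:
--                         out.append((a, b, c, d, e, f))
--     return set(out)
-- ===== Notes on version B (the rewrite author's own statement) =====
-- stated objective: alternative
-- what changed: Instead of sorting the per-axis cut points into pairwise spans and enumerating their Cartesian product, B runs a divide-and-conquer with an explicit work stack: it repeatedly picks any cut plane of either cuboid strictly inside the current piece, splits the piece in two there (lower half processed first), and collects the pieces that contain no cut plane; positive-volume leaves form the result set.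
import Mathlib
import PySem

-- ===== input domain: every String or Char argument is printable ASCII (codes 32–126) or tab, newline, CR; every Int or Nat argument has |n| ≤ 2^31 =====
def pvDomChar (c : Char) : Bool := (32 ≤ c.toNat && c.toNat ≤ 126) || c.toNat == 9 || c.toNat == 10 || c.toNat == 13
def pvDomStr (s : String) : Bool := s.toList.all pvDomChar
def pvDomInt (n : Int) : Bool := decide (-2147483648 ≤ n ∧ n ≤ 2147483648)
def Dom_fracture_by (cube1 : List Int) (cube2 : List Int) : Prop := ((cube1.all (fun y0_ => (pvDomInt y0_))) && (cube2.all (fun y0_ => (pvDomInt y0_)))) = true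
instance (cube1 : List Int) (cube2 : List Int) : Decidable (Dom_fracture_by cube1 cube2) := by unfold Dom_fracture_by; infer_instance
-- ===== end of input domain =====

-- B replaces A's sorted-pairwise-spans grid product by a divide-and-conquer with an
-- explicit work stack: any cut plane of either cuboid strictly inside the current
-- piece splits it in two, and cut-free positive pieces are collected (objective:
-- alternative decomposition).

-- ===== PORT A =====
def pvSpanOverlap (a b : List Int) : Bool :=
  !(decide (PySem.List.pyGetD a 0 0 ≥ PySem.List.pyGetD b 1 0) ||
    decide (PySem.List.pyGetD a 1 0 ≤ PySem.List.pyGetD b 0 0))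

-- pairwise(points) is ported as points.zip points.tail
def pvGetSubspans (a b : List Int) : List (Int × Int) :=
  let points := PySem.List.sorted (PySem.Set.ofList ((a ++ b).filter
      (fun x => decide (PySem.List.pyGetD a 0 0 ≤ x) && decide (x ≤ PySem.List.pyGetD a 1 0))))
      (fun x => x) false
  points.zip points.tail

def pvCubeOverlaps (c1 c2 : List Int) : Bool :=
  ([pvSpanOverlap (PySem.List.slice c1 none (some 2)) (PySem.List.slice c2 none (some 2)),
    pvSpanOverlap (PySem.List.slice c1 (some 2) (some 4)) (PySem.List.slice c2 (some 2) (some 4)),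
    pvSpanOverlap (PySem.List.slice c1 (some 4) none) (PySem.List.slice c2 (some 4) none)]).all (fun b => b)

def fracture_by (cube1 : List Int) (cube2 : List Int) : List (List Int) :=
  if !pvCubeOverlaps cube1 cube2 then [cube1] else
  let xsides := pvGetSubspans (PySem.List.slice cube1 none (some 2)) (PySem.List.slice cube2 none (some 2))
  let ysides := pvGetSubspans (PySem.List.slice cube1 (some 2) (some 4)) (PySem.List.slice cube2 (some 2) (some 4))
  let zsides := pvGetSubspans (PySem.List.slice cube1 (some 4) none) (PySem.List.slice cube2 (some 4) none)
  -- itertools.product(xsides, ysides, zsides), x-major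
  let prod := xsides.flatMap (fun xs => ysides.flatMap (fun ys => zsides.map (fun zs => (xs, ys, zs))))
  prod.foldl (fun s t =>
    if max 0 (t.1.2 - t.1.1) * max 0 (t.2.1.2 - t.2.1.1) * max 0 (t.2.2.2 - t.2.2.1) == 0 then s
    else PySem.Set.add s [t.1.1, t.1.2, t.2.1.1, t.2.1.2, t.2.2.1, t.2.2.2]) PySem.Set.empty

-- ===== PORT B =====
-- a work-stack entry (a, b, c, d, e, f) of Source B
structure pvCube where
  a : Int
  b : Int
  c : Int
  d : Int
  e : Int
  f : Int
deriving DecidableEq, Repr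

-- 'for p in cands: if lo < p < hi: … break / else: …' = first interior candidate
def pvInterior (lo hi : Int) (cands : List Int) : Option Int :=
  cands.find? (fun p => decide (lo < p) && decide (p < hi))

-- termination measure helpers (cited by pvLoop's decreasing_by)
def pvNCuts (lo hi : Int) (cands : List Int) : Nat :=
  (cands.filter (fun p => decide (lo < p) && decide (p < hi))).length

def pvWt (Cx Cy Cz : List Int) (q : pvCube) : Nat :=
  3 ^ (pvNCuts q.a q.b Cx + pvNCuts q.c q.d Cy + pvNCuts q.e q.f Cz)

theorem pvNCuts_left {lo hi p : Int} {C : List Int} (h : pvInterior lo hi C = some p) :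
    pvNCuts lo p C < pvNCuts lo hi C := by
  have hpm : p ∈ C := List.mem_of_find?_eq_some h
  have hpp := List.find?_some h
  simp only [Bool.and_eq_true, decide_eq_true_eq] at hpp
  unfold pvNCuts
  have heq : C.filter (fun x => decide (lo < x) && decide (x < p)) =
      (C.filter (fun x => decide (lo < x) && decide (x < hi))).filter
        (fun x => decide (lo < x) && decide (x < p)) := by
    rw [List.filter_filter]
    apply List.filter_congr
    intro x _
    by_cases hx2 : x < p
    · have hx3 : x < hi := lt_trans hx2 hpp.2
      simp [hx2, hx3]
    · simp [hx2]
  rw [heq]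
  apply List.length_filter_lt_length_iff_exists.mpr
  refine ⟨p, List.mem_filter.mpr ⟨hpm, by simp; omega⟩, by simp⟩

theorem pvNCuts_right {lo hi p : Int} {C : List Int} (h : pvInterior lo hi C = some p) :
    pvNCuts p hi C < pvNCuts lo hi C := by
  have hpm : p ∈ C := List.mem_of_find?_eq_some h
  have hpp := List.find?_some h
  simp only [Bool.and_eq_true, decide_eq_true_eq] at hpp
  unfold pvNCuts
  have heq : C.filter (fun x => decide (p < x) && decide (x < hi)) =
      (C.filter (fun x => decide (lo < x) && decide (x < hi))).filter
        (fun x => decide (p < x) && decide (x < hi)) := by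
    rw [List.filter_filter]
    apply List.filter_congr
    intro x _
    by_cases hx1 : p < x
    · have hlo : lo < x := lt_trans hpp.1 hx1
      by_cases hx3 : x < hi <;> simp [hx1, hx3, hlo]
    · simp [hx1]
  rw [heq]
  apply List.length_filter_lt_length_iff_exists.mpr
  refine ⟨p, List.mem_filter.mpr ⟨hpm, by simp; omega⟩, by simp⟩

theorem pvWt_split {mL mR m : Nat} (hL : mL < m) (hR : mR < m) : 3 ^ mL + 3 ^ mR < 3 ^ m := by
  have h1 : 3 ^ mL ≤ 3 ^ (m - 1) := Nat.pow_le_pow_right (by norm_num) (by omega)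
  have h2 : 3 ^ mR ≤ 3 ^ (m - 1) := Nat.pow_le_pow_right (by norm_num) (by omega)
  have h3 : 3 ^ m = 3 ^ (m - 1) * 3 := by rw [← Nat.pow_succ]; congr 1; omega
  have h4 : 1 ≤ 3 ^ (m - 1) := Nat.one_le_pow _ _ (by norm_num)
  omega

-- the 'while stack:' loop of Source B (Lean list head = Python stack top)
def pvLoop (Cx Cy Cz : List Int) (stack : List pvCube) (out : List (List Int)) :
    List (List Int) :=
  match stack with
  | [] => out
  | q :: rest =>
    match hx : pvInterior q.a q.b Cx with
    | some p => pvLoop Cx Cy Cz ({q with b := p} :: {q with a := p} :: rest) out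
    | none =>
      match hy : pvInterior q.c q.d Cy with
      | some p => pvLoop Cx Cy Cz ({q with d := p} :: {q with c := p} :: rest) out
      | none =>
        match hz : pvInterior q.e q.f Cz with
        | some p => pvLoop Cx Cy Cz ({q with f := p} :: {q with e := p} :: rest) out
        | none =>
          pvLoop Cx Cy Cz rest
            (if q.a < q.b ∧ q.c < q.d ∧ q.e < q.f then
              out ++ [[q.a, q.b, q.c, q.d, q.e, q.f]] else out)
termination_by (stack.map (pvWt Cx Cy Cz)).sum
decreasing_by
  · simp only [List.map_cons, List.sum_cons]
    have key : pvWt Cx Cy Cz {q with b := p} + pvWt Cx Cy Cz {q with a := p} <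
        pvWt Cx Cy Cz q := by
      simp only [pvWt]
      exact pvWt_split (by have := pvNCuts_left hx; omega) (by have := pvNCuts_right hx; omega)
    omega
  · simp only [List.map_cons, List.sum_cons]
    have key : pvWt Cx Cy Cz {q with d := p} + pvWt Cx Cy Cz {q with c := p} <
        pvWt Cx Cy Cz q := by
      simp only [pvWt]
      exact pvWt_split (by have := pvNCuts_left hy; omega) (by have := pvNCuts_right hy; omega)
    omega
  · simp only [List.map_cons, List.sum_cons]
    have key : pvWt Cx Cy Cz {q with f := p} + pvWt Cx Cy Cz {q with e := p} <
        pvWt Cx Cy Cz q := by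
      simp only [pvWt]
      exact pvWt_split (by have := pvNCuts_left hz; omega) (by have := pvNCuts_right hz; omega)
    omega
  · simp only [List.map_cons, List.sum_cons]
    have key : 1 ≤ pvWt Cx Cy Cz q := Nat.one_le_pow _ _ (by norm_num)
    omega

def fracture_by_alt (cube1 : List Int) (cube2 : List Int) : List (List Int) :=
  match cube1, cube2 with
  | x0 :: x1 :: y0 :: y1 :: z0 :: z1 :: t1, u0 :: u1 :: v0 :: v1 :: w0 :: w1 :: t2 =>
    if decide (x0 ≥ u1) || decide (x1 ≤ u0) || decide (y0 ≥ v1) || decide (y1 ≤ v0) ||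
       decide (z0 ≥ w1) || decide (z1 ≤ w0) then [cube1]
    else
      PySem.Set.ofList (pvLoop ([x0, x1] ++ [u0, u1]) ([y0, y1] ++ [v0, v1])
        ((z0 :: z1 :: t1) ++ (w0 :: w1 :: t2)) [⟨x0, x1, y0, y1, z0, z1⟩] [])
  | _, _ => []  -- cube1[k] / cube2[k] in Source B raises IndexError here (outside Pre_)

-- ===== PRECONDITION & SPEC =====
-- Exactly A's domain: both lists need indices 0..5, i.e. length ≥ 6
-- (A raises IndexError otherwise, and so does B).
def Pre_fracture_by (cube1 : List Int) (cube2 : List Int) : Prop :=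
  6 ≤ cube1.length ∧ 6 ≤ cube2.length
instance (cube1 : List Int) (cube2 : List Int) : Decidable (Pre_fracture_by cube1 cube2) := by
  unfold Pre_fracture_by; infer_instance

def pvWitness_fracture_by : List Int × List Int := ([0, 2, 0, 2, 0, 2], [1, 3, 0, 2, 0, 2])

def Spec_fracture_by (cube1 : List Int) (cube2 : List Int) (out : List (List Int)) : Prop :=
  out = fracture_by_alt cube1 cube2
instance (cube1 : List Int) (cube2 : List Int) (out : List (List Int)) :
    Decidable (Spec_fracture_by cube1 cube2 out) := by unfold Spec_fracture_by; infer_instance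

-- ===== CLAIM (what is proved, stated in full; the proofs are below) =====
def Claim_equal_fracture_by : Prop := ∀ (cube1 : List Int) (cube2 : List Int),
  Dom_fracture_by cube1 cube2 → Pre_fracture_by cube1 cube2 →
  Spec_fracture_by cube1 cube2 (fracture_by cube1 cube2)

-- ===== LEMMAS AND PROOFS =====

-- consecutive pairs (pairwise) of a list
def pvBp (l : List Int) : List (Int × Int) := l.zip l.tail

-- the strictly interior candidates of (lo,hi), sorted
def pvCuts (lo hi : Int) (cands : List Int) : List Int :=
  PySem.List.sorted (PySem.Set.ofList (cands.filter
    (fun c => decide (lo < c) && decide (c < hi)))) (fun x => x) false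

-- a bounds list: lo, the interior cuts, hi
def pvB (lo hi : Int) (cands : List Int) : List Int := lo :: (pvCuts lo hi cands ++ [hi])

-- one axis factor of the final grid
def pvF (lo hi : Int) (cands : List Int) : List (Int × Int) :=
  if lo < hi then pvBp (pvB lo hi cands) else []

-- the grid of final pieces of one work item, in B's emission order
def pvGrid (Cx Cy Cz : List Int) (q : pvCube) : List (List Int) :=
  (pvF q.a q.b Cx).flatMap (fun xs =>
    (pvF q.c q.d Cy).flatMap (fun ys =>
      (pvF q.e q.f Cz).map (fun zs => [xs.1, xs.2, ys.1, ys.2, zs.1, zs.2])))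

-- A's sorted point list for one axis span [lo,hi], candidates L
def pvPts (L : List Int) (lo hi : Int) : List Int :=
  PySem.List.sorted (PySem.Set.ofList (L.filter
    (fun x => decide (lo ≤ x) && decide (x ≤ hi)))) (fun x => x) false

-- the 6-list a product triple is flattened to
def pvG (t : (Int × Int) × (Int × Int) × (Int × Int)) : List Int :=
  [t.1.1, t.1.2, t.2.1.1, t.2.1.2, t.2.2.1, t.2.2.2]

theorem pvGetSubspans_eq (lo hi : Int) (ta b : List Int) :
    pvGetSubspans (lo :: hi :: ta) b = pvBp (pvPts ((lo :: hi :: ta) ++ b) lo hi) := by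
  simp [pvGetSubspans, pvPts, pvBp, pysem]

theorem pvMem_cuts {lo hi x : Int} {L : List Int} :
    x ∈ pvCuts lo hi L ↔ x ∈ L ∧ lo < x ∧ x < hi := by
  simp [pvCuts, PySem.List.mem_sorted, PySem.Set.mem_ofList, List.mem_filter]

theorem pvCuts_pairwise (lo hi : Int) (L : List Int) : (pvCuts lo hi L).Pairwise (· < ·) :=
  PySem.List.sorted_ofList_pairwise_lt _

theorem pvSortedExt {l1 l2 : List Int} (h1 : l1.Pairwise (· < ·)) (h2 : l2.Pairwise (· < ·))
    (hm : ∀ x, x ∈ l1 ↔ x ∈ l2) : l1 = l2 := by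
  exact List.Perm.eq_of_pairwise (fun _ _ _ _ hab hba => absurd hba (lt_asymm hab)) h1 h2
    ((List.perm_ext_iff_of_nodup (h1.imp fun h => ne_of_lt h) (h2.imp fun h => ne_of_lt h)).mpr hm)

theorem pvCuts_split {S : List Int} {a b p : Int} (hp : p ∈ S) (h1 : a < p) (h2 : p < b) :
    pvCuts a b S = pvCuts a p S ++ p :: pvCuts p b S := by
  apply pvSortedExt (pvCuts_pairwise a b S)
  · refine List.pairwise_append.mpr ⟨pvCuts_pairwise a p S, ?_, ?_⟩
    · refine List.pairwise_cons.mpr ⟨fun x hx => (pvMem_cuts.mp hx).2.1, pvCuts_pairwise p b S⟩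
    · intro x hx y hy
      have hx' := pvMem_cuts.mp hx
      rcases List.mem_cons.mp hy with rfl | hy'
      · omega
      · have hy'' := pvMem_cuts.mp hy'
        omega
  · intro x
    simp only [List.mem_append, List.mem_cons, pvMem_cuts]
    constructor
    · rintro ⟨hm, ha, hb⟩
      by_cases e : x = p
      · exact Or.inr (Or.inl e)
      · rcases lt_or_gt_of_ne e with h | h
        · exact Or.inl ⟨hm, ha, h⟩
        · exact Or.inr (Or.inr ⟨hm, h, hb⟩)
    · rintro (⟨hm, ha, hb⟩ | rfl | ⟨hm, ha, hb⟩)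
      · exact ⟨hm, by omega⟩
      · exact ⟨hp, h1, h2⟩
      · exact ⟨hm, by omega⟩

theorem pvBp_cons_cons (x y : Int) (l : List Int) :
    pvBp (x :: y :: l) = (x, y) :: pvBp (y :: l) := rfl

theorem pvBp_glue : ∀ (xs : List Int) (y : Int) (ys : List Int),
    pvBp (xs ++ y :: ys) = pvBp (xs ++ [y]) ++ pvBp (y :: ys) := by
  intro xs
  induction xs with
  | nil => intro y ys; simp [pvBp]
  | cons a t ih =>
    intro y ys
    cases t with
    | nil => simp [pvBp]
    | cons a' t' =>
      simp only [List.cons_append, pvBp_cons_cons]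
      rw [← List.cons_append, ih, ← List.cons_append]
      simp

theorem pvF_split {S : List Int} {a b p : Int} (hp : p ∈ S) (h1 : a < p) (h2 : p < b) :
    pvF a b S = pvF a p S ++ pvF p b S := by
  have hab : a < b := lt_trans h1 h2
  unfold pvF pvB
  rw [if_pos hab, if_pos h1, if_pos h2, pvCuts_split hp h1 h2]
  have hre : a :: ((pvCuts a p S ++ p :: pvCuts p b S) ++ [b]) =
      (a :: pvCuts a p S) ++ p :: (pvCuts p b S ++ [b]) := by simp
  rw [hre, pvBp_glue]
  simp [List.cons_append]

theorem pvInterior_none_cuts {lo hi : Int} {C : List Int} (h : pvInterior lo hi C = none) :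
    pvCuts lo hi C = [] := by
  unfold pvCuts
  have hf : C.filter (fun c => decide (lo < c) && decide (c < hi)) = [] :=
    List.filter_eq_nil_iff.mpr (fun x hx => by
      have := List.find?_eq_none.mp h x hx
      simpa using this)
  rw [hf]
  rfl

theorem pvF_none {lo hi : Int} {C : List Int} (h : pvInterior lo hi C = none) :
    pvF lo hi C = if lo < hi then [(lo, hi)] else [] := by
  unfold pvF pvB
  rw [pvInterior_none_cuts h]
  by_cases h' : lo < hi <;> simp [h', pvBp]

theorem pvLoop_nil (Cx Cy Cz : List Int) (out : List (List Int)) :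
    pvLoop Cx Cy Cz [] out = out := by
  rw [pvLoop]

theorem pvLoop_cons (Cx Cy Cz : List Int) : ∀ (n : Nat) (q : pvCube),
    pvWt Cx Cy Cz q ≤ n → ∀ (rest : List pvCube) (out : List (List Int)),
    pvLoop Cx Cy Cz (q :: rest) out = pvLoop Cx Cy Cz rest (out ++ pvGrid Cx Cy Cz q) := by
  intro n
  induction n with
  | zero =>
    intro q hq
    exact absurd hq (by have : 1 ≤ pvWt Cx Cy Cz q := Nat.one_le_pow _ _ (by norm_num); omega)
  | succ n ih =>
    intro q hq rest out
    rw [pvLoop]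
    split
    next p hx =>
      have hpm : p ∈ Cx := List.mem_of_find?_eq_some hx
      have hpp := List.find?_some hx
      simp only [Bool.and_eq_true, decide_eq_true_eq] at hpp
      have wL : pvWt Cx Cy Cz {q with b := p} ≤ n := by
        have : pvWt Cx Cy Cz {q with b := p} < pvWt Cx Cy Cz q := by
          simp only [pvWt]
          exact Nat.pow_lt_pow_right (by norm_num) (by have := pvNCuts_left hx; omega)
        omega
      have wR : pvWt Cx Cy Cz {q with a := p} ≤ n := by
        have : pvWt Cx Cy Cz {q with a := p} < pvWt Cx Cy Cz q := by
          simp only [pvWt]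
          exact Nat.pow_lt_pow_right (by norm_num) (by have := pvNCuts_right hx; omega)
        omega
      rw [ih _ wL, ih _ wR]
      have hg : pvGrid Cx Cy Cz q =
          pvGrid Cx Cy Cz {q with b := p} ++ pvGrid Cx Cy Cz {q with a := p} := by
        simp only [pvGrid]
        rw [pvF_split hpm hpp.1 hpp.2, List.flatMap_append]
      rw [hg, ← List.append_assoc]
    next hx =>
      split
      next p hy =>
        have hpm : p ∈ Cy := List.mem_of_find?_eq_some hy
        have hpp := List.find?_some hy
        simp only [Bool.and_eq_true, decide_eq_true_eq] at hpp
        have wL : pvWt Cx Cy Cz {q with d := p} ≤ n := by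
          have : pvWt Cx Cy Cz {q with d := p} < pvWt Cx Cy Cz q := by
            simp only [pvWt]
            exact Nat.pow_lt_pow_right (by norm_num) (by have := pvNCuts_left hy; omega)
          omega
        have wR : pvWt Cx Cy Cz {q with c := p} ≤ n := by
          have : pvWt Cx Cy Cz {q with c := p} < pvWt Cx Cy Cz q := by
            simp only [pvWt]
            exact Nat.pow_lt_pow_right (by norm_num) (by have := pvNCuts_right hy; omega)
          omega
        rw [ih _ wL, ih _ wR]
        have hg : pvGrid Cx Cy Cz q =
            pvGrid Cx Cy Cz {q with d := p} ++ pvGrid Cx Cy Cz {q with c := p} := by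
          simp only [pvGrid]
          rw [pvF_none hx, pvF_split hpm hpp.1 hpp.2]
          by_cases hab : q.a < q.b <;> simp [hab, List.flatMap_append]
        rw [hg, ← List.append_assoc]
      next hy =>
        split
        next p hz =>
          have hpm : p ∈ Cz := List.mem_of_find?_eq_some hz
          have hpp := List.find?_some hz
          simp only [Bool.and_eq_true, decide_eq_true_eq] at hpp
          have wL : pvWt Cx Cy Cz {q with f := p} ≤ n := by
            have : pvWt Cx Cy Cz {q with f := p} < pvWt Cx Cy Cz q := by
              simp only [pvWt]
              exact Nat.pow_lt_pow_right (by norm_num) (by have := pvNCuts_left hz; omega)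
            omega
          have wR : pvWt Cx Cy Cz {q with e := p} ≤ n := by
            have : pvWt Cx Cy Cz {q with e := p} < pvWt Cx Cy Cz q := by
              simp only [pvWt]
              exact Nat.pow_lt_pow_right (by norm_num) (by have := pvNCuts_right hz; omega)
            omega
          rw [ih _ wL, ih _ wR]
          have hg : pvGrid Cx Cy Cz q =
              pvGrid Cx Cy Cz {q with f := p} ++ pvGrid Cx Cy Cz {q with e := p} := by
            simp only [pvGrid]
            rw [pvF_none hx, pvF_none hy, pvF_split hpm hpp.1 hpp.2]
            by_cases hab : q.a < q.b <;> by_cases hcd : q.c < q.d <;>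
              simp [hab, hcd, List.map_append]
          rw [hg, ← List.append_assoc]
        next hz =>
          congr 1
          have hg : pvGrid Cx Cy Cz q =
              if q.a < q.b ∧ q.c < q.d ∧ q.e < q.f then
                [[q.a, q.b, q.c, q.d, q.e, q.f]] else [] := by
            simp only [pvGrid]
            rw [pvF_none hx, pvF_none hy, pvF_none hz]
            by_cases hab : q.a < q.b <;> by_cases hcd : q.c < q.d <;>
              by_cases hef : q.e < q.f <;> simp [hab, hcd, hef]
          rw [hg]
          by_cases hc : q.a < q.b ∧ q.c < q.d ∧ q.e < q.f <;> simp [hc]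

theorem pvPts_pos {lo hi : Int} {L : List Int} (hlo : lo ∈ L) (hhi : hi ∈ L)
    (h : lo < hi) : pvPts L lo hi = pvB lo hi L := by
  have hys : (pvB lo hi L).Pairwise (· < ·) := by
    refine List.pairwise_cons.mpr ⟨?_, ?_⟩
    · intro a ha
      rcases List.mem_append.mp ha with h' | h'
      · exact (pvMem_cuts.mp h').2.1
      · simp only [List.mem_singleton] at h'; omega
    · refine List.pairwise_append.mpr ⟨pvCuts_pairwise lo hi L, by simp, ?_⟩
      intro a ha b hb
      simp only [List.mem_singleton] at hb
      subst hb
      exact (pvMem_cuts.mp ha).2.2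
  have hperm : (pvB lo hi L).Perm
      (PySem.Set.ofList (L.filter (fun x => decide (lo ≤ x) && decide (x ≤ hi)))) := by
    refine (List.perm_ext_iff_of_nodup (hys.imp fun h => ne_of_lt h) (PySem.Set.nodup_ofList _)).mpr ?_
    intro x
    simp only [pvB, PySem.Set.mem_ofList, List.mem_filter, List.mem_cons, List.mem_append,
      List.not_mem_nil, or_false, pvMem_cuts, Bool.and_eq_true, decide_eq_true_eq]
    constructor
    · rintro (rfl | ⟨⟨hm, h1, h2⟩ | rfl⟩)
      · exact ⟨hlo, by omega⟩
      · exact ⟨hm, by omega⟩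
      · exact ⟨hhi, by omega⟩
    · rintro ⟨hm, h1, h2⟩
      by_cases e1 : x = lo
      · exact Or.inl e1
      · by_cases e2 : x = hi
        · exact Or.inr (Or.inr e2)
        · exact Or.inr (Or.inl ⟨hm, by omega⟩)
  exact PySem.List.sorted_eq_of_perm_of_pairwise_lt _ _ _ hperm hys

theorem pvPts_deg {lo hi : Int} (L : List Int) (h : hi ≤ lo) :
    pvBp (pvPts L lo hi) = [] := by
  have hconst : ∀ x ∈ L.filter (fun x => decide (lo ≤ x) && decide (x ≤ hi)), x = lo := by
    intro x hx
    have := List.mem_filter.mp hx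
    simp only [Bool.and_eq_true, decide_eq_true_eq] at this
    omega
  have : PySem.Set.ofList (L.filter (fun x => decide (lo ≤ x) && decide (x ≤ hi))) = [] ∨
      PySem.Set.ofList (L.filter (fun x => decide (lo ≤ x) && decide (x ≤ hi))) = [lo] := by
    generalize L.filter (fun x => decide (lo ≤ x) && decide (x ≤ hi)) = M at hconst
    induction M with
    | nil => exact Or.inl rfl
    | cons a t ih =>
      have ha : a = lo := hconst a (by simp)
      rcases ih (fun x hx => hconst x (by simp [hx])) with h | h <;>
        · rw [PySem.Set.ofList_cons, h]
          subst ha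
          simp [PySem.Set.discard]
  unfold pvPts pvBp
  rcases this with h | h <;> rw [h] <;> rfl

-- consecutive pairs of a strictly increasing list are increasing
theorem pvZip_tail_lt {l : List Int} (hl : l.Pairwise (· < ·)) :
    ∀ se ∈ pvBp l, se.1 < se.2 := by
  unfold pvBp
  induction l with
  | nil => simp
  | cons a t ih =>
    cases t with
    | nil => simp
    | cons b t' =>
      intro se hse
      simp only [List.tail_cons, List.zip_cons_cons, List.mem_cons] at hse
      rcases hse with h | h
      · subst h; exact (List.pairwise_cons.mp hl).1 b (by simp)
      · exact ih (List.pairwise_cons.mp hl).2 se h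

theorem pvB_pairwise {lo hi : Int} (L : List Int) (h : lo < hi) :
    (pvB lo hi L).Pairwise (· < ·) := by
  refine List.pairwise_cons.mpr ⟨?_, ?_⟩
  · intro a ha
    rcases List.mem_append.mp ha with h' | h'
    · exact (pvMem_cuts.mp h').2.1
    · simp only [List.mem_singleton] at h'; omega
  · refine List.pairwise_append.mpr ⟨pvCuts_pairwise lo hi L, by simp, ?_⟩
    intro a ha b hb
    simp only [List.mem_singleton] at hb
    subst hb
    exact (pvMem_cuts.mp ha).2.2

theorem pvFoldA (L : List ((Int × Int) × (Int × Int) × (Int × Int)))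
    (hL : ∀ t ∈ L, t.1.1 < t.1.2 ∧ t.2.1.1 < t.2.1.2 ∧ t.2.2.1 < t.2.2.2) :
    L.foldl (fun s t =>
      if max 0 (t.1.2 - t.1.1) * max 0 (t.2.1.2 - t.2.1.1) * max 0 (t.2.2.2 - t.2.2.1) == 0 then s
      else PySem.Set.add s [t.1.1, t.1.2, t.2.1.1, t.2.1.2, t.2.2.1, t.2.2.2]) PySem.Set.empty
    = PySem.Set.ofList (L.map pvG) := by
  have h1 : L.foldl (fun s t =>
      if max 0 (t.1.2 - t.1.1) * max 0 (t.2.1.2 - t.2.1.1) * max 0 (t.2.2.2 - t.2.2.1) == 0 then s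
      else PySem.Set.add s [t.1.1, t.1.2, t.2.1.1, t.2.1.2, t.2.2.1, t.2.2.2]) PySem.Set.empty
      = L.foldl (fun s t => PySem.Set.add s (pvG t)) PySem.Set.empty := by
    refine PySem.List.foldl_congr_mem _ _ _ _ ?_
    intro s t ht
    have h := hL t ht
    have hv : max 0 (t.1.2 - t.1.1) * max 0 (t.2.1.2 - t.2.1.1) * max 0 (t.2.2.2 - t.2.2.1) ≠ 0 := by
      have a1 : (0:Int) < max 0 (t.1.2 - t.1.1) := by omega
      have a2 : (0:Int) < max 0 (t.2.1.2 - t.2.1.1) := by omega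
      have a3 : (0:Int) < max 0 (t.2.2.2 - t.2.2.1) := by omega
      positivity
    simp [pvG, hv]
  rw [h1, ← PySem.Set.update_map_eq_foldl_add]
  exact PySem.Set.update_nil_left _

-- ===== VERDICT (by name: the statement is the Claim_ definition above) =====
theorem fracture_by_spec : Claim_equal_fracture_by := by
  intro c1 c2 _ hpre
  obtain ⟨h1, h2⟩ := hpre
  obtain ⟨x0, x1, y0, y1, z0, z1, t1, rfl⟩ :
      ∃ a b c d e f t, c1 = a :: b :: c :: d :: e :: f :: t := by
    rcases c1 with _ | ⟨a, _ | ⟨b, _ | ⟨c, _ | ⟨d, _ | ⟨e, _ | ⟨f, t⟩⟩⟩⟩⟩⟩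
    · simp at h1
    · simp at h1
    · simp at h1
    · simp at h1
    · simp at h1
    · simp at h1
    · exact ⟨_, _, _, _, _, _, _, rfl⟩
  obtain ⟨u0, u1, v0, v1, w0, w1, t2, rfl⟩ :
      ∃ a b c d e f t, c2 = a :: b :: c :: d :: e :: f :: t := by
    rcases c2 with _ | ⟨a, _ | ⟨b, _ | ⟨c, _ | ⟨d, _ | ⟨e, _ | ⟨f, t⟩⟩⟩⟩⟩⟩
    · simp at h2
    · simp at h2
    · simp at h2
    · simp at h2
    · simp at h2
    · simp at h2
    · exact ⟨_, _, _, _, _, _, _, rfl⟩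
  unfold Spec_fracture_by
  have e1 : PySem.List.slice (x0 :: x1 :: y0 :: y1 :: z0 :: z1 :: t1) none (some 2) = [x0, x1] := by
    rw [PySem.List.slice_to _ (show (0:Int) ≤ 2 by norm_num)]
    rfl
  have e2 : PySem.List.slice (x0 :: x1 :: y0 :: y1 :: z0 :: z1 :: t1) (some 2) (some 4) = [y0, y1] := by
    rw [PySem.List.slice_toNat _ (show (0:Int) ≤ 2 by norm_num) (show (0:Int) ≤ 4 by norm_num)]
    rfl
  have e3 : PySem.List.slice (x0 :: x1 :: y0 :: y1 :: z0 :: z1 :: t1) (some 4) none = z0 :: z1 :: t1 := by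
    rw [PySem.List.slice_from _ (show (0:Int) ≤ 4 by norm_num)]
    rfl
  have e4 : PySem.List.slice (u0 :: u1 :: v0 :: v1 :: w0 :: w1 :: t2) none (some 2) = [u0, u1] := by
    rw [PySem.List.slice_to _ (show (0:Int) ≤ 2 by norm_num)]
    rfl
  have e5 : PySem.List.slice (u0 :: u1 :: v0 :: v1 :: w0 :: w1 :: t2) (some 2) (some 4) = [v0, v1] := by
    rw [PySem.List.slice_toNat _ (show (0:Int) ≤ 2 by norm_num) (show (0:Int) ≤ 4 by norm_num)]
    rfl
  have e6 : PySem.List.slice (u0 :: u1 :: v0 :: v1 :: w0 :: w1 :: t2) (some 4) none = w0 :: w1 :: t2 := by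
    rw [PySem.List.slice_from _ (show (0:Int) ≤ 4 by norm_num)]
    rfl
  by_cases hov : x0 < u1 ∧ u0 < x1 ∧ y0 < v1 ∧ v0 < y1 ∧ z0 < w1 ∧ w0 < z1
  · have hA : pvCubeOverlaps (x0 :: x1 :: y0 :: y1 :: z0 :: z1 :: t1)
        (u0 :: u1 :: v0 :: v1 :: w0 :: w1 :: t2) = true := by
      unfold pvCubeOverlaps
      rw [e1, e2, e3, e4, e5, e6]
      simp [pvSpanOverlap, PySem.List.pyGetD_ofNat']
      omega
    have hBg : (decide (x0 ≥ u1) || decide (x1 ≤ u0) || decide (y0 ≥ v1) || decide (y1 ≤ v0) ||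
        decide (z0 ≥ w1) || decide (z1 ≤ w0)) = false := by
      simp; omega
    simp only [fracture_by, fracture_by_alt, hA, hBg, Bool.not_true, Bool.false_eq_true,
      if_false]
    rw [e1, e2, e3, e4, e5, e6, pvGetSubspans_eq, pvGetSubspans_eq, pvGetSubspans_eq]
    rw [pvLoop_cons _ _ _ _ _ (le_refl _), pvLoop_nil, List.nil_append]
    by_cases hd : x0 < x1 ∧ y0 < y1 ∧ z0 < z1
    · have px : pvPts ([x0, x1] ++ [u0, u1]) x0 x1 = pvB x0 x1 ([x0, x1] ++ [u0, u1]) :=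
        pvPts_pos (by simp) (by simp) hd.1
      have py : pvPts ([y0, y1] ++ [v0, v1]) y0 y1 = pvB y0 y1 ([y0, y1] ++ [v0, v1]) :=
        pvPts_pos (by simp) (by simp) hd.2.1
      have pz : pvPts ((z0 :: z1 :: t1) ++ (w0 :: w1 :: t2)) z0 z1 =
          pvB z0 z1 ((z0 :: z1 :: t1) ++ (w0 :: w1 :: t2)) :=
        pvPts_pos (by simp) (by simp) hd.2.2
      rw [px, py, pz]
      have hL : ∀ t ∈ (pvBp (pvB x0 x1 ([x0, x1] ++ [u0, u1]))).flatMap (fun xs =>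
          (pvBp (pvB y0 y1 ([y0, y1] ++ [v0, v1]))).flatMap (fun ys =>
            (pvBp (pvB z0 z1 ((z0 :: z1 :: t1) ++ (w0 :: w1 :: t2)))).map (fun zs => (xs, ys, zs)))),
          t.1.1 < t.1.2 ∧ t.2.1.1 < t.2.1.2 ∧ t.2.2.1 < t.2.2.2 := by
        intro t ht
        simp only [List.mem_flatMap, List.mem_map] at ht
        obtain ⟨xs, hxs, ys, hys, zs, hzs, rfl⟩ := ht
        exact ⟨pvZip_tail_lt (pvB_pairwise _ hd.1) xs hxs,
               pvZip_tail_lt (pvB_pairwise _ hd.2.1) ys hys,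
               pvZip_tail_lt (pvB_pairwise _ hd.2.2) zs hzs⟩
      rw [pvFoldA _ hL]
      have hGrid : pvGrid ([x0, x1] ++ [u0, u1]) ([y0, y1] ++ [v0, v1])
          ((z0 :: z1 :: t1) ++ (w0 :: w1 :: t2)) ⟨x0, x1, y0, y1, z0, z1⟩ =
          (pvBp (pvB x0 x1 ([x0, x1] ++ [u0, u1]))).flatMap (fun xs =>
            (pvBp (pvB y0 y1 ([y0, y1] ++ [v0, v1]))).flatMap (fun ys =>
              (pvBp (pvB z0 z1 ((z0 :: z1 :: t1) ++ (w0 :: w1 :: t2)))).map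
                (fun zs => [xs.1, xs.2, ys.1, ys.2, zs.1, zs.2]))) := by
        simp only [pvGrid, pvF]
        rw [if_pos hd.1, if_pos hd.2.1, if_pos hd.2.2]
      rw [hGrid]
      congr 1
      simp [List.map_flatMap, List.map_map, pvG, Function.comp_def]
    · -- some axis of cube1 is degenerate: both sides are the empty set
      have hGrid0 : pvGrid ([x0, x1] ++ [u0, u1]) ([y0, y1] ++ [v0, v1])
          ((z0 :: z1 :: t1) ++ (w0 :: w1 :: t2)) ⟨x0, x1, y0, y1, z0, z1⟩ = [] := by
        simp only [pvGrid, pvF]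
        rcases (by omega : ¬ x0 < x1 ∨ ¬ y0 < y1 ∨ ¬ z0 < z1) with h | h | h <;>
          simp [h]
      rw [hGrid0]
      have hconstnil : ∀ l : List (Int × Int),
          l.flatMap (fun _ : Int × Int =>
            ([] : List ((Int × Int) × (Int × Int) × (Int × Int)))) = [] := by
        intro l; induction l <;> simp_all
      rcases (by omega : x1 ≤ x0 ∨ y1 ≤ y0 ∨ z1 ≤ z0) with h | h | h <;>
        rw [pvPts_deg _ h] <;> simp [hconstnil]
  · have hA : pvCubeOverlaps (x0 :: x1 :: y0 :: y1 :: z0 :: z1 :: t1)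
        (u0 :: u1 :: v0 :: v1 :: w0 :: w1 :: t2) = false := by
      unfold pvCubeOverlaps
      rw [e1, e2, e3, e4, e5, e6]
      simp [pvSpanOverlap, PySem.List.pyGetD_ofNat']
      omega
    have hBg : (decide (x0 ≥ u1) || decide (x1 ≤ u0) || decide (y0 ≥ v1) || decide (y1 ≤ v0) ||
        decide (z0 ≥ w1) || decide (z1 ≤ w0)) = true := by
      simp; omega
    simp [fracture_by, fracture_by_alt, hA, hBg]
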